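-- pv_equiv track=rewrite | github.com/sarahgededents/password_generator | security/time_cracker.py | number_results
-- ===== SOURCE A (Python) =====
-- import math
-- import string
--
-- def multicomb(n, k):
--     return math.comb(n+k-1, k)
--
-- def number_results(target):
--     charsets = []
--     if any(map(lambda c: c in string.ascii_lowercase, target)):
--         charsets.append(string.ascii_lowercase)
--     if any(map(lambda c: c in string.ascii_uppercase, target)):
--         charsets.append(string.ascii_uppercase)
--     if any(map(lambda c: c in string.digits, target)):
--         charsets.append(string.digits)
--     if any(map(lambda c: c in string.punctuation, target)):
--         charsets.append(string.punctuation)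
--
--     alphabet = "".join(charsets)
--     if not alphabet:
--         return 0
--     n = 0
--     for length in range(len(target)):
--         n += multicomb(len(alphabet), length) * math.factorial(length)
--     return n
-- ===== SOURCE B (Python) =====
-- import string
--
-- def number_results(target):
--     m = sum(len(cs) for cs in (string.ascii_lowercase, string.ascii_uppercase,
--                                string.digits, string.punctuation)
--             if any(c in cs for c in target))
--     if m == 0:
--         return 0
--     total, term = 0, 1
--     for k in range(len(target)):
--         total += term
--         term *= m + k
--     return total
-- ===== Notes on version B (the rewrite author's own statement) =====
-- stated objective: faster
-- what changed: Replaces the per-length math.comb(n+k-1,k)*k! evaluation by a single pass keeping a running rising-factorial term (term *= m+k) and a running sum, so each term costs one big-integer multiplication instead of rebuilding comb and factorial.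
import Mathlib
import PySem

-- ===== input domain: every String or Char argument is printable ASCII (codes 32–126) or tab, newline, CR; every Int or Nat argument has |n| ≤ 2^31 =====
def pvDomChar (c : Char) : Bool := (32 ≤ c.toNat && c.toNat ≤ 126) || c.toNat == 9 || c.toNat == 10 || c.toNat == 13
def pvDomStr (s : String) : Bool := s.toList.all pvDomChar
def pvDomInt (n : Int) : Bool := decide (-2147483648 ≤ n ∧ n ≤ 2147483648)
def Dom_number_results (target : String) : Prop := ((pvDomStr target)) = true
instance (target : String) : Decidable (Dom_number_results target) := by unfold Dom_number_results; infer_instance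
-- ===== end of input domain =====

-- B replaces A's per-term comb(n+k-1,k)*k! big-integer products by an incremental
-- running term (term *= m+k) in one pass: O(L) multiplications instead of O(L^2).

def pyLower : List Char := "abcdefghijklmnopqrstuvwxyz".toList
def pyUpper : List Char := "ABCDEFGHIJKLMNOPQRSTUVWXYZ".toList
def pyDigits : List Char := "0123456789".toList
def pyPunct : List Char := "!\"#$%&'()*+,-./:;<=>?@[\\]^_`{|}~".toList

-- ===== PORT A =====
-- math.comb(n+k-1, k); only called with n = len(alphabet) ≥ 1, k ≥ 0 as in A
def multicomb (n k : Nat) : Int := ((n + k - 1).choose k : Int)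

def number_results (target : String) : Int :=
  let tl := target.toList
  let charsets : List (List Char) := []
  let charsets := if tl.any (fun c => pyLower.contains c) then charsets ++ [pyLower] else charsets
  let charsets := if tl.any (fun c => pyUpper.contains c) then charsets ++ [pyUpper] else charsets
  let charsets := if tl.any (fun c => pyDigits.contains c) then charsets ++ [pyDigits] else charsets
  let charsets := if tl.any (fun c => pyPunct.contains c) then charsets ++ [pyPunct] else charsets
  let alphabet := charsets.flatten
  if alphabet = [] then 0
  else
    (List.range tl.length).foldl
      (fun n length => n + multicomb alphabet.length length * (Nat.factorial length : Int)) 0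

-- ===== PORT B =====
def number_results_alt (target : String) : Int :=
  let tl := target.toList
  let m := (([pyLower, pyUpper, pyDigits, pyPunct].filter
              (fun cs => tl.any (fun c => cs.contains c))).map List.length).sum
  if m = 0 then 0
  else
    ((List.range tl.length).foldl
      (fun (st : Int × Int) (k : Nat) => (st.1 + st.2, st.2 * ((m : Int) + (k : Int)))) (0, 1)).1

-- ===== PRECONDITION & SPEC =====
def Spec_number_results (target : String) (out : Int) : Prop := out = number_results_alt target
instance (target : String) (out : Int) : Decidable (Spec_number_results target out) := by unfold Spec_number_results; infer_instance

-- ===== CLAIM (what is proved, stated in full; the proofs are below) =====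
def Claim_equal_number_results : Prop := ∀ (target : String), Dom_number_results target → Spec_number_results target (number_results target)

-- ===== LEMMAS AND PROOFS =====

-- A's per-length term equals the rising factorial m·(m+1)···(m+length-1)
lemma multicomb_mul_factorial (m k : Nat) :
    multicomb m k * (Nat.factorial k : Int) = (m.ascFactorial k : Int) := by
  unfold multicomb
  rw [Nat.ascFactorial_eq_factorial_mul_choose']
  push_cast
  ring

-- B's pair fold carries (partial sum of A's terms, next rising factorial)
lemma pair_fold_inv (m : Nat) (L : Nat) :
    (List.range L).foldl
      (fun (st : Int × Int) (k : Nat) => (st.1 + st.2, st.2 * ((m : Int) + (k : Int)))) (0, 1)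
    = ((List.range L).foldl
         (fun n length => n + multicomb m length * (Nat.factorial length : Int)) 0,
       (m.ascFactorial L : Int)) := by
  induction L with
  | zero => simp
  | succ L ih =>
      rw [List.range_succ, List.foldl_append, List.foldl_append, ih]
      simp [multicomb_mul_factorial, Nat.ascFactorial_succ]
      ring

-- the two folds agree for any alphabet size m
lemma folds_eq (m L : Nat) :
    (List.range L).foldl
      (fun n length => n + multicomb m length * (Nat.factorial length : Int)) 0
    = ((List.range L).foldl
        (fun (st : Int × Int) (k : Nat) => (st.1 + st.2, st.2 * ((m : Int) + (k : Int)))) (0, 1)).1 := by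
  rw [pair_fold_inv]

-- ===== VERDICT (by name: the statement is the Claim_ definition above) =====
theorem number_results_spec : Claim_equal_number_results := by
  intro target _
  unfold Spec_number_results number_results number_results_alt
  by_cases h1 : target.toList.any (fun c => pyLower.contains c) <;>
  by_cases h2 : target.toList.any (fun c => pyUpper.contains c) <;>
  by_cases h3 : target.toList.any (fun c => pyDigits.contains c) <;>
  by_cases h4 : target.toList.any (fun c => pyPunct.contains c) <;>
    simp only [h1, h2, h3, h4, if_true, if_false, Bool.false_eq_true,
      List.filter, List.nil_append, List.flatten, List.map, List.sum] <;>
    norm_num [pyLower, pyUpper, pyDigits, pyPunct, folds_eq]
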